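-- pv_equiv track=rewrite | github.com/JonathamC/N-queen-problem-using-genetic-algorithm | n_queen_problem.py | countQueensAttacking
-- ===== SOURCE A (Python) =====
-- def countQueensAttacking(matrix):
--     """
--     Count number of queens attacking in matrix.
--     Used in calculating fitness score.
--     """
--     total = 0
--     for i in matrix:
--         queen = 0
--         for j in i:
--             if j == "Q":
--                 queen += 1
--         if queen > 0:
--             total += queen - 1
--
--     return total
-- ===== SOURCE B (Python) =====
-- def countQueensAttacking(matrix):
--     rows_of_queens = [i for i, row in enumerate(matrix) for cell in row if cell == "Q"]
--     return len(rows_of_queens) - len(set(rows_of_queens))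
-- ===== Notes on version B (the rewrite author's own statement) =====
-- stated objective: alternative
-- what changed: Instead of A's per-row accumulate-and-conditionally-subtract loop, B flattens the matrix into the list of row indices of all queens and returns its length minus the size of its set of distinct indices (one deduplication replaces the per-row conditional).
import Mathlib
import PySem

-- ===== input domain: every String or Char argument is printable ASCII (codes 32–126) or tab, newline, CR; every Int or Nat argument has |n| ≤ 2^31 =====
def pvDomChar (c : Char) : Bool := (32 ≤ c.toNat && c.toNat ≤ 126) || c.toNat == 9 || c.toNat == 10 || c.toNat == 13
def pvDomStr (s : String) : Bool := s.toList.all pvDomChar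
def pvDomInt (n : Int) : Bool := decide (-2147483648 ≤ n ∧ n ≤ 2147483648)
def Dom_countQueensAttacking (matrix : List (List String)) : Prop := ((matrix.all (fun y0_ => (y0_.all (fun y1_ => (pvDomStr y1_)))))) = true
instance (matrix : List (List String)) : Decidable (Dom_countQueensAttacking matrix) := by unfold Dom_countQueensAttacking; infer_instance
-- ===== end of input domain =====

-- B flattens the matrix into the list of row indices of all queens and returns its length minus
-- the number of distinct indices in it (a set), instead of A's per-row count-and-subtract loop; objective: alternative.

-- ===== PORT A =====
def countQueensAttacking (matrix : List (List String)) : Int :=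
  matrix.foldl (fun total i =>
    let queen : Int := i.foldl (fun q j => if j == "Q" then q + 1 else q) 0
    if queen > 0 then total + (queen - 1) else total) 0

-- ===== PORT B =====
def countQueensAttacking_alt (matrix : List (List String)) : Int :=
  let rowsOfQueens : List Int :=
    (PySem.List.enumerate matrix).flatMap
      (fun p => (p.2.filter (fun cell => cell == "Q")).map (fun _ => p.1))
  (rowsOfQueens.length : Int) - ((PySem.Set.ofList rowsOfQueens).length : Int)

-- ===== PRECONDITION & SPEC =====
def Spec_countQueensAttacking (matrix : List (List String)) (out : Int) : Prop := out = countQueensAttacking_alt matrix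
instance (matrix : List (List String)) (out : Int) : Decidable (Spec_countQueensAttacking matrix out) := by unfold Spec_countQueensAttacking; infer_instance

-- ===== CLAIM (what is proved, stated in full; the proofs are below) =====
def Claim_equal_countQueensAttacking : Prop := ∀ (matrix : List (List String)), Dom_countQueensAttacking matrix → Spec_countQueensAttacking matrix (countQueensAttacking matrix)

-- ===== LEMMAS AND PROOFS =====

-- the flat list of row indices, parameterised by the enumeration start
def cqaRows (matrix : List (List String)) (s : Int) : List Int :=
  (PySem.List.enumerate matrix s).flatMap
    (fun p => (p.2.filter (fun cell => cell == "Q")).map (fun _ => p.1))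

theorem cqaRows_cons (row : List String) (rest : List (List String)) (s : Int) :
    cqaRows (row :: rest) s
      = List.replicate (row.count "Q") s ++ cqaRows rest (s + 1) := by
  simp [cqaRows, PySem.List.enumerate_cons, List.count_eq_length_filter,
        List.map_const']

theorem cqaRows_mem_ge (matrix : List (List String)) (s : Int) :
    ∀ x ∈ cqaRows matrix s, s ≤ x := by
  induction matrix generalizing s with
  | nil => simp [cqaRows, PySem.List.enumerate_nil]
  | cons row rest ih =>
    intro x hx
    rw [cqaRows_cons] at hx
    rcases List.mem_append.mp hx with h | h
    · exact le_of_eq (List.eq_of_mem_replicate h).symm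
    · exact le_trans (by omega) (ih (s + 1) x h)

-- pushing a fresh head element through Set.ofList's fold
theorem foldl_add_cons_of_not_mem (a : Int) (ys : List Int) (h : a ∉ ys) :
    ∀ t : List Int, ys.foldl PySem.Set.add (a :: t) = a :: ys.foldl PySem.Set.add t := by
  induction ys with
  | nil => intro t; rfl
  | cons y ys ih =>
    intro t
    have hne : y ≠ a := fun he => h (by simp [he])
    have h' : a ∉ ys := fun hm => h (List.mem_cons_of_mem _ hm)
    have e1 : PySem.Set.add (a :: t) y
        = if t.contains y then a :: t else a :: (t ++ [y]) := by
      by_cases hc : t.contains y <;>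
        simp [PySem.Set.add, PySem.Set.contains, hne]
    have e2 : PySem.Set.add t y = if t.contains y then t else t ++ [y] := by
      by_cases hc : t.contains y <;> simp [PySem.Set.add, PySem.Set.contains]
    by_cases hc : t.contains y
    · simp only [List.foldl_cons, e1, e2, hc, if_true]
      exact ih h' t
    · simp only [List.foldl_cons, e1, e2, hc]
      exact ih h' (t ++ [y])

theorem foldl_add_replicate (c : Nat) (s : Int) (t : List Int) (h : s ∈ t) :
    (List.replicate c s).foldl PySem.Set.add t = t := by
  induction c with
  | zero => rfl
  | succ c ih =>
    have : PySem.Set.add t s = t := by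
      simp [PySem.Set.add, PySem.Set.contains, h]
    simp [List.replicate_succ, this, ih]

theorem ofList_replicate_append (c : Nat) (s : Int) (ys : List Int) (h : s ∉ ys) :
    PySem.Set.ofList (List.replicate c s ++ ys)
      = (if c = 0 then [] else [s]) ++ PySem.Set.ofList ys := by
  rw [PySem.Set.ofList_eq_foldl, List.foldl_append]
  cases c with
  | zero => simp [PySem.Set.ofList_eq_foldl]
  | succ c =>
    have e0 : PySem.Set.add ([] : List Int) s = [s] := rfl
    rw [List.replicate_succ, List.foldl_cons, e0, foldl_add_replicate c s [s] (by simp),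
        foldl_add_cons_of_not_mem s ys h []]
    simp [PySem.Set.ofList_eq_foldl]

-- A's per-row inner loop is a count
theorem cqa_inner (i : List String) :
    i.foldl (fun q j => if j == "Q" then q + 1 else q) (0 : Int) = (i.count "Q" : Int) := by
  simpa using PySem.List.foldl_beq_add_one i "Q" (0 : Int)

theorem cqa_main (matrix : List (List String)) (s a : Int) :
    matrix.foldl (fun total i =>
        if ((i.count "Q" : Int)) > 0 then total + ((i.count "Q" : Int) - 1) else total) a
      = a + ((cqaRows matrix s).length : Int)
          - ((PySem.Set.ofList (cqaRows matrix s)).length : Int) := by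
  induction matrix generalizing s a with
  | nil => simp [cqaRows, PySem.List.enumerate_nil, PySem.Set.ofList]
  | cons row rest ih =>
    have hnm : s ∉ cqaRows rest (s + 1) := fun hm => by
      have := cqaRows_mem_ge rest (s + 1) s hm; omega
    rw [List.foldl_cons, ih (s + 1), cqaRows_cons,
        ofList_replicate_append _ _ _ hnm]
    have hle : ((PySem.Set.ofList (cqaRows rest (s + 1))).length : Int)
        ≤ ((cqaRows rest (s + 1)).length : Int) := by
      exact_mod_cast PySem.Set.length_ofList_le (cqaRows rest (s + 1))
    by_cases hc : row.count "Q" = 0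
    · simp [hc]
    · have hmem : "Q" ∈ row := List.count_pos_iff.mp (Nat.pos_of_ne_zero hc)
      simp [hmem, hc]
      omega

-- ===== VERDICT (by name: the statement is the Claim_ definition above) =====
theorem countQueensAttacking_spec : Claim_equal_countQueensAttacking := by
  intro matrix _
  unfold Spec_countQueensAttacking countQueensAttacking countQueensAttacking_alt
  simp only [cqa_inner]
  have h := cqa_main matrix 0 0
  rw [zero_add] at h
  exact h
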